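-- pv_equiv track=rewrite | github.com/michelleweii/Helpers | crop_images_using_content.py | preDealGT
-- ===== SOURCE A (Python) =====
-- def regPoints(points, rowNum, colNum):
--     return [[min(max(x[0], 0),  colNum - 1), min(max(x[1], 0), rowNum - 1)]  for x in points]
--
-- def preDealGT(gtPoints, rowNum, colNum):
--     # len_p = len(gtPoints)
--     #filter irregular point in gt points
--     gtPoints = regPoints(gtPoints, rowNum, colNum)
--     #generate 4 points by 2 points rect
--     max_x = max([point[0] for point in gtPoints])
--     min_x = min([point[0] for point in gtPoints])
--     max_y = max([point[1] for point in gtPoints])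
--     min_y = min([point[1] for point in gtPoints])
--     gtPoints = [min_x, min_y, max_x, max_y]
--     return gtPoints
-- ===== SOURCE B (Python) =====
-- def preDealGT(gtPoints, rowNum, colNum):
--     first, *rest = gtPoints
--     min_x = max_x = min(max(first[0], 0), colNum - 1)
--     min_y = max_y = min(max(first[1], 0), rowNum - 1)
--     for p in rest:
--         cx = min(max(p[0], 0), colNum - 1)
--         cy = min(max(p[1], 0), rowNum - 1)
--         min_x = min(min_x, cx)
--         max_x = max(max_x, cx)
--         min_y = min(min_y, cy)
--         max_y = max(max_y, cy)
--     return [min_x, min_y, max_x, max_y]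
-- ===== Notes on version B (the rewrite author's own statement) =====
-- stated objective: simpler
-- what changed: Replaced the five passes (one clamping comprehension plus four min/max comprehensions) by a single fused loop that clamps each point once and updates four running extremes; Pre_ excludes the empty list (A's max([]) raises ValueError) and points with fewer than 2 coordinates (IndexError in A).
import Mathlib
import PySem

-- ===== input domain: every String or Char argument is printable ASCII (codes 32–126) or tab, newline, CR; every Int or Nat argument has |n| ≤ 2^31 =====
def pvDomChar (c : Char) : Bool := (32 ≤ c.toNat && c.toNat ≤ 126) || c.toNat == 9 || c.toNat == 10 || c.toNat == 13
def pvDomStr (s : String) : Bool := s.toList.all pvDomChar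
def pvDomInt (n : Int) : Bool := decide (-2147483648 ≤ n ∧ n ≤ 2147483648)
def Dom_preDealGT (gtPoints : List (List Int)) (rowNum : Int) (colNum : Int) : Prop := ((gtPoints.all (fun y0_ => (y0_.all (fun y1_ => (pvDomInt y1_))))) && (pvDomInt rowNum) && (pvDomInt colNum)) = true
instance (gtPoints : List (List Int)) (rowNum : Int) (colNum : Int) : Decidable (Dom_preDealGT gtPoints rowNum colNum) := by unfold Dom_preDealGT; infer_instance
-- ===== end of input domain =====

-- B fuses A's five passes (clamping comprehension + four min/max comprehensions) into one
-- loop keeping four running extremes; return values proved equal on nonempty well-formed input.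

-- ===== PORT A =====
-- x[0]/x[1] via pyGet?; Pre_ guarantees the index is in range, .getD 0 is never the raising case there
def regPointsA (points : List (List Int)) (rowNum : Int) (colNum : Int) : List (List Int) :=
  points.map (fun x =>
    [min (max ((PySem.List.pyGet? x 0).getD 0) 0) (colNum - 1),
     min (max ((PySem.List.pyGet? x 1).getD 0) 0) (rowNum - 1)])

def preDealGT (gtPoints : List (List Int)) (rowNum : Int) (colNum : Int) : List Int :=
  let g := regPointsA gtPoints rowNum colNum
  let max_x := (PySem.List.max? (g.map (fun point => (PySem.List.pyGet? point 0).getD 0)) (fun y => y)).getD 0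
  let min_x := (PySem.List.min? (g.map (fun point => (PySem.List.pyGet? point 0).getD 0)) (fun y => y)).getD 0
  let max_y := (PySem.List.max? (g.map (fun point => (PySem.List.pyGet? point 1).getD 0)) (fun y => y)).getD 0
  let min_y := (PySem.List.min? (g.map (fun point => (PySem.List.pyGet? point 1).getD 0)) (fun y => y)).getD 0
  [min_x, min_y, max_x, max_y]

-- ===== PORT B =====
-- 'first, *rest = gtPoints' then a single pass: state (min_x, min_y, max_x, max_y),
-- clamp each point once, update with min/max. The unpacking raises on [] (outside Pre_).
def preDealGT_alt (gtPoints : List (List Int)) (rowNum : Int) (colNum : Int) : List Int :=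
  match gtPoints with
  | [] => []   -- Python's unpacking raises ValueError here; excluded by Pre_
  | first :: rest =>
    let cx0 := min (max ((PySem.List.pyGet? first 0).getD 0) 0) (colNum - 1)
    let cy0 := min (max ((PySem.List.pyGet? first 1).getD 0) 0) (rowNum - 1)
    let s := rest.foldl (fun (st : Int × Int × Int × Int) p =>
      let cx := min (max ((PySem.List.pyGet? p 0).getD 0) 0) (colNum - 1)
      let cy := min (max ((PySem.List.pyGet? p 1).getD 0) 0) (rowNum - 1)
      (min st.1 cx, min st.2.1 cy, max st.2.2.1 cx, max st.2.2.2 cy))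
      (cx0, cy0, cx0, cy0)
    [s.1, s.2.1, s.2.2.1, s.2.2.2]

-- ===== PRECONDITION & SPEC =====
-- Pre_ excludes the empty list (A's max([]) raises ValueError; B's unpacking raises too) and
-- points with fewer than 2 coordinates (x[0]/x[1] raise IndexError in both).
def Pre_preDealGT (gtPoints : List (List Int)) (rowNum : Int) (colNum : Int) : Prop :=
  gtPoints ≠ [] ∧ ∀ p ∈ gtPoints, 2 ≤ p.length
instance (gtPoints : List (List Int)) (rowNum : Int) (colNum : Int) : Decidable (Pre_preDealGT gtPoints rowNum colNum) := by unfold Pre_preDealGT; infer_instance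
def pvWitness_preDealGT : List (List Int) × Int × Int := ([[1, 2], [-3, 9]], 4, 5)
def Spec_preDealGT (gtPoints : List (List Int)) (rowNum : Int) (colNum : Int) (out : List Int) : Prop := out = preDealGT_alt gtPoints rowNum colNum
instance (gtPoints : List (List Int)) (rowNum : Int) (colNum : Int) (out : List Int) : Decidable (Spec_preDealGT gtPoints rowNum colNum out) := by unfold Spec_preDealGT; infer_instance

-- ===== CLAIM (what is proved, stated in full; the proofs are below) =====
def Claim_equal_preDealGT : Prop := ∀ (gtPoints : List (List Int)) (rowNum : Int) (colNum : Int), Dom_preDealGT gtPoints rowNum colNum → Pre_preDealGT gtPoints rowNum colNum → Spec_preDealGT gtPoints rowNum colNum (preDealGT gtPoints rowNum colNum)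

-- ===== LEMMAS AND PROOFS =====

-- B's 4-tuple fold splits into four independent folds
theorem alt_foldl_split (rest : List (List Int)) (rowNum colNum : Int)
    (a b c d : Int) :
    rest.foldl (fun (st : Int × Int × Int × Int) q =>
      let cx := min (max ((PySem.List.pyGet? q 0).getD 0) 0) (colNum - 1)
      let cy := min (max ((PySem.List.pyGet? q 1).getD 0) 0) (rowNum - 1)
      (min st.1 cx, min st.2.1 cy, max st.2.2.1 cx, max st.2.2.2 cy)) (a, b, c, d)
    = (rest.foldl (fun s q => min s (min (max ((PySem.List.pyGet? q 0).getD 0) 0) (colNum - 1))) a,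
       rest.foldl (fun s q => min s (min (max ((PySem.List.pyGet? q 1).getD 0) 0) (rowNum - 1))) b,
       rest.foldl (fun s q => max s (min (max ((PySem.List.pyGet? q 0).getD 0) 0) (colNum - 1))) c,
       rest.foldl (fun s q => max s (min (max ((PySem.List.pyGet? q 1).getD 0) 0) (rowNum - 1))) d) := by
  induction rest generalizing a b c d with
  | nil => rfl
  | cons q t ih => simp only [List.foldl_cons]; exact ih _ _ _ _

theorem preDealGT_spec' (gtPoints : List (List Int)) (rowNum colNum : Int)
    (hpre : Pre_preDealGT gtPoints rowNum colNum) :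
    preDealGT gtPoints rowNum colNum = preDealGT_alt gtPoints rowNum colNum := by
  obtain ⟨hne, _⟩ := hpre
  match gtPoints with
  | [] => exact absurd rfl hne
  | p :: rest =>
    simp only [preDealGT, preDealGT_alt, regPointsA, List.map_cons, List.map_map,
      alt_foldl_split]
    have hproj0 : ∀ q : List Int,
        (PySem.List.pyGet? [min (max ((PySem.List.pyGet? q 0).getD 0) 0) (colNum - 1),
          min (max ((PySem.List.pyGet? q 1).getD 0) 0) (rowNum - 1)] 0).getD 0
        = min (max ((PySem.List.pyGet? q 0).getD 0) 0) (colNum - 1) := by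
      intro q; rfl
    have hproj1 : ∀ q : List Int,
        (PySem.List.pyGet? [min (max ((PySem.List.pyGet? q 0).getD 0) 0) (colNum - 1),
          min (max ((PySem.List.pyGet? q 1).getD 0) 0) (rowNum - 1)] 1).getD 0
        = min (max ((PySem.List.pyGet? q 1).getD 0) 0) (rowNum - 1) := by
      intro q; rfl
    simp only [Function.comp_def, hproj0, hproj1,
      PySem.List.max?_id_cons, PySem.List.min?_id_cons, Option.getD_some,
      List.foldl_map]

-- ===== VERDICT (by name: the statement is the Claim_ definition above) =====
theorem preDealGT_spec : Claim_equal_preDealGT := by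
  intro gtPoints rowNum colNum _ hpre
  exact preDealGT_spec' gtPoints rowNum colNum hpre
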